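-- pv_equiv track=rewrite | github.com/daniel-reich/turbo-robot | 5D3iXJSkSreRzNS8W_21.py | news_at_ten
-- ===== SOURCE A (Python) =====
-- def news_at_ten(txt, n):
--     lst = []
--     a = n + (len(txt) * 2) - len(txt)
--     for i in range(len(txt) + n + 1):
--         screen = ""
--         e = 0
--         for i in range(n + (len(txt) * 2) + 1):
--             if i != a:
--                 screen += " "
--             elif e < len(txt):
--                 screen += txt[e]
--                 e += 1
--                 a += 1
--         lst.append(screen[len(txt):(len(txt) + n)])
--         a -= (1 + e)
--     return lst
-- ===== SOURCE B (Python) =====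
-- def news_at_ten(txt, n):
--     w = max(n, 0)  # visible screen width (empty frames when n <= 0)
--     track = " " * w + txt + " " * w
--     return [track[k:k + w] for k in range(len(txt) + n + 1)]
-- ===== Notes on version B (the rewrite author's own statement) =====
-- stated objective: faster
-- what changed: B builds the padded track ' '*w + txt + ' '*w once and emits each frame as a direct slice track[k:k+w], instead of A's per-frame character-by-character rebuild of the whole virtual screen of width n+2*len(txt) followed by slicing out the visible window.
import Mathlib
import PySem

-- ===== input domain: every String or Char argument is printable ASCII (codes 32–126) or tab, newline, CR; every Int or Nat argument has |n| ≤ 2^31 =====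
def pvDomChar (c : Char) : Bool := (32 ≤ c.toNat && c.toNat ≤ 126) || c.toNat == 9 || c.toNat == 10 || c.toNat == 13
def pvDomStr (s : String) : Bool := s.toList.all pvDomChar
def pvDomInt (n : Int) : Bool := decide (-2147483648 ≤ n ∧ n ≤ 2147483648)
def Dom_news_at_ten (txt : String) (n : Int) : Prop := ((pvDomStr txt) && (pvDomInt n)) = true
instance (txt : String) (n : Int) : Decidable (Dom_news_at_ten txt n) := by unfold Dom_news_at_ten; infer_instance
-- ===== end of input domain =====

-- B builds the padded track once and takes each frame as a slice of it, instead of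
-- A's per-frame rebuild of the whole virtual screen (objective: faster).

-- ===== PORT A =====
-- inner loop body of A ('for i in range(n + len*2 + 1)'); txt[e] is only read under the
-- guard e < len(txt), where it never raises, so pyGetD with a dummy default is exact there
def newsInnerStep (cs : List Char) (st : List Char × Int × Int) (i : Int) : List Char × Int × Int :=
  match st with
  | (screen, e, a) =>
    if i ≠ a then (screen ++ [' '], e, a)
    else if e < (cs.length : Int) then (screen ++ [PySem.List.pyGetD cs e ' '], e + 1, a + 1)
    else (screen, e, a)

-- outer loop body of A: run the inner loop, append screen[len:len+n], a -= (1+e)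
def newsOuterStep (cs : List Char) (n : Int) (st : List String × Int) (_i : Int) : List String × Int :=
  match st with
  | (lst, a) =>
    match (PySem.List.pyRange 0 (n + (cs.length : Int) * 2 + 1) 1).foldl (newsInnerStep cs) ([], 0, a) with
    | (screen, e, a2) =>
      (lst ++ [String.ofList (PySem.List.slice screen (some (cs.length : Int)) (some ((cs.length : Int) + n)))],
       a2 - (1 + e))

def news_at_ten (txt : String) (n : Int) : List String :=
  ((PySem.List.pyRange 0 ((txt.toList.length : Int) + n + 1) 1).foldl
    (newsOuterStep txt.toList n)
    ([], n + (txt.toList.length : Int) * 2 - (txt.toList.length : Int))).1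

-- ===== PORT B =====
def news_at_ten_alt (txt : String) (n : Int) : List String :=
  let w : Int := max n 0
  let track : List Char := List.replicate w.toNat ' ' ++ txt.toList ++ List.replicate w.toNat ' '
  (PySem.List.pyRange 0 ((txt.toList.length : Int) + n + 1) 1).map
    (fun k => String.ofList (PySem.List.slice track (some k) (some (k + w))))

-- ===== PRECONDITION & SPEC =====
def Spec_news_at_ten (txt : String) (n : Int) (out : List String) : Prop := out = news_at_ten_alt txt n
instance (txt : String) (n : Int) (out : List String) : Decidable (Spec_news_at_ten txt n out) := by unfold Spec_news_at_ten; infer_instance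

-- ===== CLAIM (what is proved, stated in full; the proofs are below) =====
def Claim_equal_news_at_ten : Prop := ∀ (txt : String) (n : Int), Dom_news_at_ten txt n → Spec_news_at_ten txt n (news_at_ten txt n)

-- ===== LEMMAS AND PROOFS =====

-- Phase lemma: while the column index never meets a, every step appends a space.
lemma inner_spaces_nat (cs : List Char) :
    ∀ (d : Nat) (lo : Int) (s : List Char) (e a : Int), (a < lo ∨ lo + d ≤ a) →
      (PySem.List.pyRange lo (lo + d) 1).foldl (newsInnerStep cs) (s, e, a)
        = (s ++ List.replicate d ' ', e, a) := by
  intro d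
  induction d with
  | zero =>
    intro lo s e a ha
    simp [PySem.List.pyRange_one_eq_nil (le_refl lo)]
  | succ d ih =>
    intro lo s e a ha
    have hlt : lo < lo + ((d + 1 : Nat) : Int) := by push_cast; omega
    rw [PySem.List.pyRange_one_cons hlt]
    have hne : (lo : Int) ≠ a := by push_cast at ha; omega
    have hstep : newsInnerStep cs (s, e, a) lo = (s ++ [' '], e, a) := by
      simp [newsInnerStep, hne]
    rw [List.foldl_cons, hstep]
    have hr : lo + ((d + 1 : Nat) : Int) = (lo + 1) + (d : Int) := by push_cast; ring
    rw [hr]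
    have := ih (lo + 1) (s ++ [' ']) e a (by push_cast at ha ⊢; omega)
    rw [this]
    simp [List.replicate_succ, List.append_assoc]

lemma inner_spaces (cs : List Char) (lo hi : Int) (h : lo ≤ hi)
    (s : List Char) (e a : Int) (ha : a < lo ∨ hi ≤ a) :
    (PySem.List.pyRange lo hi 1).foldl (newsInnerStep cs) (s, e, a)
      = (s ++ List.replicate (hi - lo).toNat ' ', e, a) := by
  have hd : lo + (((hi - lo).toNat : Nat) : Int) = hi := by omega
  have h1 := inner_spaces_nat cs (hi - lo).toNat lo s e a (by rw [hd]; exact ha)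
  rw [hd] at h1
  exact h1

-- Phase lemma: m consecutive columns starting at a copy the remaining m characters.
lemma inner_chars (cs : List Char) :
    ∀ (m : Nat) (s : List Char) (e a : Int), 0 ≤ e → e + m = cs.length →
      (PySem.List.pyRange a (a + m) 1).foldl (newsInnerStep cs) (s, e, a)
        = (s ++ cs.drop e.toNat, (cs.length : Int), a + m) := by
  intro m
  induction m with
  | zero =>
    intro s e a he hlen
    have : e = (cs.length : Int) := by omega
    simp [PySem.List.pyRange_one_eq_nil, this, List.drop_length]
  | succ m ih =>
    intro s e a he hlen
    have hlt : a < a + ((m + 1 : Nat) : Int) := by push_cast; omega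
    rw [PySem.List.pyRange_one_cons hlt]
    have helt : e < (cs.length : Int) := by omega
    have hstep : newsInnerStep cs (s, e, a) a = (s ++ [PySem.List.pyGetD cs e ' '], e + 1, a + 1) := by
      simp [newsInnerStep, helt]
    rw [List.foldl_cons, hstep]
    have hr : a + ((m + 1 : Nat) : Int) = (a + 1) + (m : Int) := by push_cast; ring
    rw [hr]
    have := ih (s ++ [PySem.List.pyGetD cs e ' ']) (e + 1) (a + 1) (by omega) (by omega)
    rw [this]
    have hnat : e.toNat < cs.length := by omega
    have hget : PySem.List.pyGetD cs e ' ' = cs[e.toNat] := by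
      have := @PySem.List.pyGetD_eq_getElem Char cs e ' ' he helt
      exact this
    have htn : (e + 1).toNat = e.toNat + 1 := by omega
    rw [hget, htn, List.drop_eq_getElem_cons hnat]
    simp only [List.append_assoc, List.singleton_append]

-- The whole inner loop from offset a0: spaces, the text, one skipped column, spaces.
lemma inner_full (cs : List Char) (n a0 : Int) (h0 : 0 ≤ a0) (h1 : a0 ≤ n + cs.length) :
    (PySem.List.pyRange 0 (n + (cs.length : Int) * 2 + 1) 1).foldl (newsInnerStep cs) ([], 0, a0)
      = (List.replicate a0.toNat ' ' ++ cs ++ List.replicate (n + cs.length - a0).toNat ' ',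
         (cs.length : Int), a0 + cs.length) := by
  have hs1 : PySem.List.pyRange 0 (n + (cs.length : Int) * 2 + 1) 1
      = PySem.List.pyRange 0 a0 1 ++ PySem.List.pyRange a0 (n + (cs.length : Int) * 2 + 1) 1 :=
    PySem.List.pyRange_one_append 0 a0 _ h0 (by omega)
  have hs2 : PySem.List.pyRange a0 (n + (cs.length : Int) * 2 + 1) 1
      = PySem.List.pyRange a0 (a0 + (cs.length : Int)) 1
        ++ PySem.List.pyRange (a0 + (cs.length : Int)) (n + (cs.length : Int) * 2 + 1) 1 :=
    PySem.List.pyRange_one_append _ _ _ (by omega) (by omega)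
  have hs3 : PySem.List.pyRange (a0 + (cs.length : Int)) (n + (cs.length : Int) * 2 + 1) 1
      = PySem.List.pyRange (a0 + (cs.length : Int)) (a0 + (cs.length : Int) + 1) 1
        ++ PySem.List.pyRange (a0 + (cs.length : Int) + 1) (n + (cs.length : Int) * 2 + 1) 1 :=
    PySem.List.pyRange_one_append _ _ _ (by omega) (by omega)
  rw [hs1, hs2, hs3, List.foldl_append, List.foldl_append, List.foldl_append]
  rw [inner_spaces cs 0 a0 h0 [] 0 a0 (Or.inr (le_refl a0))]
  have h01 : ((a0 - 0).toNat) = a0.toNat := by omega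
  rw [h01, List.nil_append]
  rw [inner_chars cs cs.length (List.replicate a0.toNat ' ') 0 a0 le_rfl (by simp)]
  rw [PySem.List.pyRange_one_singleton, List.foldl_cons, List.foldl_nil]
  have hstep : newsInnerStep cs
      (List.replicate a0.toNat ' ' ++ cs.drop (0 : Int).toNat, (cs.length : Int), a0 + (cs.length : Int))
      (a0 + (cs.length : Int))
      = (List.replicate a0.toNat ' ' ++ cs.drop (0 : Int).toNat, (cs.length : Int), a0 + (cs.length : Int)) := by
    simp [newsInnerStep]
  rw [hstep]
  rw [inner_spaces cs (a0 + (cs.length : Int) + 1) (n + (cs.length : Int) * 2 + 1) (by omega)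
      _ _ _ (Or.inl (by omega))]
  have hc : (n + (cs.length : Int) * 2 + 1 - (a0 + (cs.length : Int) + 1)).toNat
      = (n + (cs.length : Int) - a0).toNat := by omega
  rw [hc]
  simp [List.append_assoc]

-- take/drop plumbing
lemma take_drop_prefix {α : Type} (l t : List α) (a b : Nat) (h : a + b ≤ l.length) :
    ((l ++ t).drop a).take b = (l.drop a).take b := by
  have ha : a ≤ l.length := by omega
  rw [List.drop_append_of_le_length ha]
  have hb : b ≤ (l.drop a).length := by simp; omega
  rw [List.take_append_of_le_length hb]

lemma window_eq (cs : List Char) (N K : Nat) (hK : K ≤ N + cs.length) :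
    ((List.replicate (N + cs.length - K) ' ' ++ cs ++ List.replicate K ' ').drop cs.length).take N
      = ((List.replicate N ' ' ++ cs ++ List.replicate N ' ').drop K).take N := by
  simp only [List.append_assoc]
  have hKr : List.replicate K (' ' : Char) ++ List.replicate (N + cs.length - K) ' '
      = List.replicate (N + cs.length) ' ' := by
    rw [← List.replicate_add]; congr 1; omega
  have hNr : List.replicate N (' ' : Char) ++ List.replicate cs.length ' '
      = List.replicate (N + cs.length) ' ' := by
    rw [← List.replicate_add]
  have hA : ((List.replicate (N + cs.length - K) ' ' ++ (cs ++ List.replicate K ' ')).drop cs.length).take N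
      = ((List.replicate (N + cs.length - K) ' ' ++ (cs ++ List.replicate (N + cs.length) ' ')).drop cs.length).take N := by
    conv_rhs => rw [← hKr]
    have h := take_drop_prefix
        (List.replicate (N + cs.length - K) ' ' ++ (cs ++ List.replicate K ' '))
        (List.replicate (N + cs.length - K) ' ') cs.length N
        (by simp [List.length_append, List.length_replicate]; omega)
    simp only [List.append_assoc] at h
    rw [← h]
  have hB : ((List.replicate N ' ' ++ (cs ++ List.replicate N ' ')).drop K).take N
      = ((List.replicate N ' ' ++ (cs ++ List.replicate (N + cs.length) ' ')).drop K).take N := by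
    conv_rhs => rw [← hNr]
    have h := take_drop_prefix
        (List.replicate N ' ' ++ (cs ++ List.replicate N ' '))
        (List.replicate cs.length ' ') K N
        (by simp [List.length_append, List.length_replicate]; omega)
    simp only [List.append_assoc] at h
    rw [← h]
  rw [hA, hB]
  have d1 : List.replicate (N + cs.length - K) (' ' : Char) ++ (cs ++ List.replicate (N + cs.length) ' ')
      = (List.replicate (N + cs.length) ' ' ++ (cs ++ List.replicate (N + cs.length) ' ')).drop K := by
    rw [List.drop_append_of_le_length (by simp [List.length_replicate]; omega), List.drop_replicate]
  have d2 : List.replicate N (' ' : Char) ++ (cs ++ List.replicate (N + cs.length) ' ')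
      = (List.replicate (N + cs.length) ' ' ++ (cs ++ List.replicate (N + cs.length) ' ')).drop cs.length := by
    rw [List.drop_append_of_le_length (by simp [List.length_replicate])]
    rw [List.drop_replicate]
    congr 2
    omega
  rw [d1, d2, List.drop_drop, List.drop_drop, Nat.add_comm K cs.length]

-- The frame A extracts from its full screen equals B's slice of the padded track.
lemma frame_eq (cs : List Char) (n k : Int) (hk0 : 0 ≤ k) (hk : k ≤ n + cs.length) :
    PySem.List.slice (List.replicate (n + cs.length - k).toNat ' ' ++ cs ++ List.replicate k.toNat ' ')
        (some (cs.length : Int)) (some ((cs.length : Int) + n))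
      = PySem.List.slice (List.replicate (max n 0).toNat ' ' ++ cs ++ List.replicate (max n 0).toNat ' ')
        (some k) (some (k + max n 0)) := by
  have hca : (0:Int) ≤ (cs.length : Int) := Int.natCast_nonneg _
  by_cases hn : n ≤ 0
  · have hmax : max n 0 = 0 := by omega
    rw [hmax]
    rw [PySem.List.slice_toNat _ hca (by omega)]
    rw [PySem.List.slice_toNat _ hk0 (by omega)]
    have e1 : ((cs.length : Int) + n).toNat - ((cs.length : Int)).toNat = 0 := by omega
    have e2 : (k + 0).toNat - k.toNat = 0 := by omega
    rw [e1, e2]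
    simp
  · have hn' : 0 < n := by omega
    have hmax : max n 0 = n := by omega
    rw [hmax]
    rw [PySem.List.slice_toNat _ hca (by omega)]
    rw [PySem.List.slice_toNat _ hk0 (by omega)]
    have e1 : ((cs.length : Int) + n).toNat - ((cs.length : Int)).toNat = n.toNat := by omega
    have e2 : (k + n).toNat - k.toNat = n.toNat := by omega
    have e3 : ((cs.length : Int)).toNat = cs.length := by omega
    have e4 : (n + (cs.length : Int) - k).toNat = n.toNat + cs.length - k.toNat := by omega
    rw [e1, e2, e3, e4]
    exact window_eq cs n.toNat k.toNat (by omega)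

-- Outer-loop invariant: after t frames, the list holds B's first t frames and a = n+len-t.
lemma outer_inv (cs : List Char) (n : Int) :
    ∀ (t : Int), 0 ≤ t → t ≤ (cs.length : Int) + n + 1 →
      (PySem.List.pyRange 0 t 1).foldl (newsOuterStep cs n) ([], n + (cs.length : Int))
        = ((PySem.List.pyRange 0 t 1).map (fun k =>
              String.ofList (PySem.List.slice
                (List.replicate (max n 0).toNat ' ' ++ cs ++ List.replicate (max n 0).toNat ' ')
                (some k) (some (k + max n 0)))),
           n + (cs.length : Int) - t) := by
  intro t ht
  induction t, ht using Int.le_induction with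
  | base =>
    intro _
    simp [PySem.List.pyRange_one_eq_nil (le_refl 0)]
  | succ t ht ih =>
    intro hle
    rw [PySem.List.pyRange_one_succ_right ht, List.foldl_append, List.map_append, ih (by omega)]
    rw [List.foldl_cons, List.foldl_nil]
    show newsOuterStep cs n (_, n + (cs.length : Int) - t) t = _
    rw [newsOuterStep]
    rw [inner_full cs n (n + (cs.length : Int) - t) (by omega) (by omega)]
    have e1 : n + (cs.length : Int) - (n + (cs.length : Int) - t) = t := by ring
    rw [e1]
    dsimp only
    rw [frame_eq cs n t (by omega) (by omega)]
    simp only [List.map_cons, List.map_nil]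
    refine congrArg₂ Prod.mk rfl ?_
    omega

-- ===== VERDICT (by name: the statement is the Claim_ definition above) =====
theorem news_at_ten_spec : Claim_equal_news_at_ten := by
  unfold Claim_equal_news_at_ten
  intro txt n _
  unfold Spec_news_at_ten news_at_ten news_at_ten_alt
  by_cases h : (txt.toList.length : Int) + n + 1 ≤ 0
  · rw [PySem.List.pyRange_one_eq_nil h]
    simp
  · have ha : n + (txt.toList.length : Int) * 2 - (txt.toList.length : Int)
        = n + (txt.toList.length : Int) := by ring
    rw [ha]
    rw [outer_inv txt.toList n ((txt.toList.length : Int) + n + 1) (by omega) le_rfl]
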